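-- pv_equiv track=rewrite | github.com/xfrnk2/restaurant_simulation | src/restaurant.py | cooks_update
-- ===== SOURCE A (Python) =====
-- def cooks_update(cooks):
--     cooks = sorted(cooks, key=lambda x: x[0])
--     idx = 0
--     for i, cook in enumerate(cooks):
--         cooks[i][0] -= 1
--         if cook[0] < 1:
--             idx += 1
--     return cooks[idx:], cooks[:idx]
-- ===== SOURCE B (Python) =====
-- def cooks_update(cooks):
--     busy, done = [], []
--     for c in cooks:
--         c[0] -= 1
--         target = done if c[0] < 1 else busy
--         i = 0
--         while i < len(target) and target[i][0] <= c[0]: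
--             i += 1
--         target.insert(i, c)
--     return busy, done
-- ===== Notes on version B (the rewrite author's own statement) =====
-- stated objective: alternative
-- what changed: B replaces A's global sort + counted slice with a single online pass: each cook is decremented and then inserted by a hand-written stable insertion (linear scan) into one of two separately maintained sorted lists (busy/done), so there is no call to sorted, no index counting and no slicing.
import Mathlib
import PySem

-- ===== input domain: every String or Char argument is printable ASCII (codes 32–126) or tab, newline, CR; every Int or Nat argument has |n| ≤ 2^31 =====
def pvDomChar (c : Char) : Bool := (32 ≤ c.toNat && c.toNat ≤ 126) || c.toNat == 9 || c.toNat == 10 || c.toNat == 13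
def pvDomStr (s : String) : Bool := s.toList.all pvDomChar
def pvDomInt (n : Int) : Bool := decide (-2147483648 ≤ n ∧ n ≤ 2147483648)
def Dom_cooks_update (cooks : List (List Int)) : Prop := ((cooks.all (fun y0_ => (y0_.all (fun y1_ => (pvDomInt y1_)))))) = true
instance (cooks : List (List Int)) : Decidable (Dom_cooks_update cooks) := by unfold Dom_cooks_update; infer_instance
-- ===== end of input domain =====

-- B replaces A's global sort + counted slice by one online pass that inserts each decremented
-- cook into one of two separately maintained sorted lists (hand-written stable insertion);
-- equivalence is about the return value; both Pythons mutate the inner lists identically (each timer decremented once).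

-- ===== PORT A =====
-- c[0] -= 1 on the inner list (nonempty under Pre_); the same statement appears in both Pythons
def pvDec (c : List Int) : List Int :=
  match c with
  | [] => []
  | h :: t => (h - 1) :: t

def cooks_update (cooks : List (List Int)) : List (List Int) × List (List Int) :=
  -- cooks = sorted(cooks, key=lambda x: x[0]); x[0] = headI under Pre_ (inner lists nonempty)
  let s := PySem.List.sorted cooks (fun x => x.headI) false
  -- for i, cook in enumerate(cooks): cooks[i][0] -= 1; if cook[0] < 1: idx += 1
  -- (cook aliases cooks[i], so the test reads the decremented value)
  let st := s.foldl (fun (st : List (List Int) × Int) cook =>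
      let cook' := pvDec cook
      (st.1 ++ [cook'], if cook'.headI < 1 then st.2 + 1 else st.2)) ([], 0)
  (PySem.List.slice st.1 (some st.2) none, PySem.List.slice st.1 none (some st.2))

-- ===== PORT B =====
-- the while loop: skip while target[i][0] <= c[0], then target.insert(i, c)
def pvInsB (x : List Int) : List (List Int) → List (List Int)
  | [] => [x]
  | y :: t => if y.headI ≤ x.headI then y :: pvInsB x t else x :: y :: t

def cooks_update_alt (cooks : List (List Int)) : List (List Int) × List (List Int) :=
  -- for c in cooks: c[0] -= 1; target = done if c[0] < 1 else busy; <linear insert>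
  cooks.foldl (fun (st : List (List Int) × List (List Int)) c =>
    let c' := pvDec c
    if c'.headI < 1 then (st.1, pvInsB c' st.2) else (pvInsB c' st.1, st.2)) ([], [])

-- ===== PRECONDITION & SPEC =====
-- Pre_ excludes exactly the inputs with an empty inner list, on which Python A raises IndexError (x[0]).
def Pre_cooks_update (cooks : List (List Int)) : Prop := ∀ c ∈ cooks, c ≠ []
instance (cooks : List (List Int)) : Decidable (Pre_cooks_update cooks) := by unfold Pre_cooks_update; infer_instance

def pvWitness_cooks_update : List (List Int) := [[3], [1, 2], [0]]

def Spec_cooks_update (cooks : List (List Int)) (out : List (List Int) × List (List Int)) : Prop := out = cooks_update_alt cooks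
instance (cooks : List (List Int)) (out : List (List Int) × List (List Int)) : Decidable (Spec_cooks_update cooks out) := by unfold Spec_cooks_update; infer_instance

-- ===== CLAIM (what is proved, stated in full; the proofs are below) =====
def Claim_equal_cooks_update : Prop := ∀ (cooks : List (List Int)), Dom_cooks_update cooks → Pre_cooks_update cooks → Spec_cooks_update cooks (cooks_update cooks)

-- ===== LEMMAS AND PROOFS =====

-- A's loop over the sorted list = map of the decrement plus a count of the done ones
theorem pv_foldl_eq (s : List (List Int)) : ∀ (acc : List (List Int)) (i : Int),
    s.foldl (fun (st : List (List Int) × Int) cook =>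
      let cook' := pvDec cook
      (st.1 ++ [cook'], if cook'.headI < 1 then st.2 + 1 else st.2)) (acc, i)
    = (acc ++ s.map pvDec, i + ((s.map pvDec).countP (fun c => decide (c.headI < 1)) : Int)) := by
  induction s with
  | nil => intro acc i; simp
  | cons x t ih =>
    intro acc i
    simp only [List.foldl_cons, List.map_cons, List.countP_cons, ih]
    by_cases h : (pvDec x).headI < 1
    · simp [h]; omega
    · simp [h]

-- inserting a decremented element into a decremented list = decrementing afterwards (nonempty elements)
theorem pv_insertBy_map (x : List Int) (ys : List (List Int)) (hx : x ≠ [])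
    (hys : ∀ y ∈ ys, y ≠ []) :
    PySem.List.insertBy (fun a b => decide ((a : List Int).headI < b.headI)) (pvDec x) (ys.map pvDec)
    = (PySem.List.insertBy (fun a b => decide ((a : List Int).headI < b.headI)) x ys).map pvDec := by
  induction ys with
  | nil => simp [PySem.List.insertBy]
  | cons y t ih =>
    have hy : y ≠ [] := hys y (by simp)
    have hcond : (decide ((pvDec x).headI < (pvDec y).headI)) = decide (x.headI < y.headI) := by
      obtain ⟨a, x', rfl⟩ := List.exists_cons_of_ne_nil hx
      obtain ⟨b, y', rfl⟩ := List.exists_cons_of_ne_nil hy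
      simp only [pvDec, List.headI_cons]
      rw [decide_eq_decide]
      omega
    simp only [List.map_cons, PySem.List.insertBy]
    rw [hcond]
    by_cases h : x.headI < y.headI
    · simp [h, pvDec]
    · simp only [h, decide_false, Bool.false_eq_true, if_false]
      rw [ih (fun z hz => hys z (by simp [hz]))]
      simp

-- elements of insertBy come from x or ys
theorem pv_insertBy_ne_nil (x : List Int) (ys : List (List Int)) (hx : x ≠ [])
    (hys : ∀ y ∈ ys, y ≠ []) :
    ∀ z ∈ PySem.List.insertBy (fun a b => decide ((a : List Int).headI < b.headI)) x ys, z ≠ [] := by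
  intro z hz
  rcases (PySem.List.mem_insertBy _ x z ys).mp hz with h | h
  · exact h ▸ hx
  · exact hys z h

-- sorting commutes with the uniform decrement (all inner lists nonempty)
theorem pv_sorted_map (cooks : List (List Int)) (h : ∀ c ∈ cooks, c ≠ []) :
    PySem.List.sorted (cooks.map pvDec) (fun x => x.headI) false
    = (PySem.List.sorted cooks (fun x => x.headI) false).map pvDec := by
  rw [PySem.List.sorted_eq_foldl_insertBy, PySem.List.sorted_eq_foldl_insertBy, List.foldl_map]
  suffices H : ∀ (xs acc : List (List Int)), (∀ c ∈ xs, c ≠ []) → (∀ c ∈ acc, c ≠ []) →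
      xs.foldl (fun acc x => PySem.List.insertBy (fun a b => decide ((a : List Int).headI < b.headI)) (pvDec x) acc) (acc.map pvDec)
      = (xs.foldl (fun acc x => PySem.List.insertBy (fun a b => decide ((a : List Int).headI < b.headI)) x acc) acc).map pvDec by
    simpa using H cooks [] h (by simp)
  intro xs
  induction xs with
  | nil => intro acc _ _; simp
  | cons x t ih =>
    intro acc hxs hacc
    have hx : x ≠ [] := hxs x (by simp)
    simp only [List.foldl_cons]
    rw [pv_insertBy_map x acc hx hacc]
    exact ih _ (fun c hc => hxs c (by simp [hc])) (pv_insertBy_ne_nil x acc hx hacc)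

-- a list sorted by headI splits at the count of the done ones: filter = take/drop
theorem pv_split (l : List (List Int)) (h : l.Pairwise (fun a b => (a : List Int).headI ≤ b.headI)) :
    l.filter (fun c => decide (c.headI < 1)) = l.take (l.countP (fun c => decide (c.headI < 1)))
    ∧ l.filter (fun c => decide (1 ≤ c.headI)) = l.drop (l.countP (fun c => decide (c.headI < 1))) := by
  induction l with
  | nil => exact ⟨rfl, rfl⟩
  | cons a t ih =>
    rcases List.pairwise_cons.mp h with ⟨ha, ht⟩
    rcases ih ht with ⟨ih1, ih2⟩
    by_cases hp : a.headI < 1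
    · have h1 : ¬ (1 ≤ a.headI) := by omega
      simp [hp, h1, ih1, ih2]
    · have hall : ∀ b ∈ t, ¬ (b.headI < 1) := fun b hb => by have := ha b hb; omega
      have hcnt : t.countP (fun c => decide (c.headI < 1)) = 0 := by
        rw [List.countP_eq_zero]; intro b hb; simpa using hall b hb
      have h1 : 1 ≤ a.headI := by omega
      have hf1 : t.filter (fun c => decide ((c : List Int).headI < 1)) = [] := by
        rw [List.filter_eq_nil_iff]; intro b hb; simpa using hall b hb
      have hf2 : t.filter (fun c => decide (1 ≤ (c : List Int).headI)) = t := by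
        rw [List.filter_eq_self]; intro b hb; have := hall b hb; simp; omega
      simp [hp, h1, hcnt, hf1, hf2]

-- B's linear insertion = PySem's insertBy with the strict-less comparison
theorem pv_insB_eq (x : List Int) : ∀ (ys : List (List Int)),
    pvInsB x ys = PySem.List.insertBy (fun a b => decide ((a : List Int).headI < b.headI)) x ys := by
  intro ys
  induction ys with
  | nil => rfl
  | cons y t ih =>
    simp only [pvInsB, PySem.List.insertBy]
    by_cases h : y.headI ≤ x.headI
    · have h2 : ¬ (x.headI < y.headI) := by omega
      simp [h, h2, ih]
    · have h2 : x.headI < y.headI := by omega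
      simp [h, h2]

-- B's single pass = two independent insertion sorts of the partitioned, decremented list
theorem pv_fold_part (d : List (List Int)) : ∀ (b dn : List (List Int)),
    d.foldl (fun (st : List (List Int) × List (List Int)) c' =>
      if c'.headI < 1 then (st.1, pvInsB c' st.2) else (pvInsB c' st.1, st.2)) (b, dn)
    = ((d.filter (fun c => decide (1 ≤ c.headI))).foldl (fun a x => pvInsB x a) b,
       (d.filter (fun c => decide (c.headI < 1))).foldl (fun a x => pvInsB x a) dn) := by
  induction d with
  | nil => intro b dn; rfl
  | cons c t ih =>
    intro b dn
    by_cases h : c.headI < 1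
    · have h1 : ¬ (1 ≤ c.headI) := by omega
      simp only [List.foldl_cons, List.filter_cons, h, h1, decide_true, decide_false,
        if_true, if_false, Bool.false_eq_true]
      exact ih b (pvInsB c dn)
    · have h1 : 1 ≤ c.headI := by omega
      simp only [List.foldl_cons, List.filter_cons, h, h1, decide_true, decide_false,
        if_true, if_false, Bool.false_eq_true]
      exact ih (pvInsB c b) dn

-- insertBy preserves sortedness by headI
theorem pv_ins_pairwise (x : List Int) : ∀ (ys : List (List Int)),
    ys.Pairwise (fun a b => (a : List Int).headI ≤ b.headI) →
    (PySem.List.insertBy (fun a b => decide ((a : List Int).headI < b.headI)) x ys).Pairwise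
      (fun a b => (a : List Int).headI ≤ b.headI) := by
  intro ys
  induction ys with
  | nil => intro _; simp [PySem.List.insertBy]
  | cons y t ih =>
    intro h
    rcases List.pairwise_cons.mp h with ⟨hy, ht⟩
    simp only [PySem.List.insertBy]
    by_cases hc : x.headI < y.headI
    · simp only [hc, decide_true, if_true]
      refine List.pairwise_cons.mpr ⟨?_, h⟩
      intro z hz
      rcases List.mem_cons.mp hz with rfl | hz
      · omega
      · have := hy z hz; omega
    · simp only [hc, decide_false, Bool.false_eq_true, if_false]
      refine List.pairwise_cons.mpr ⟨?_, ih ht⟩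
      intro z hz
      rcases (PySem.List.mem_insertBy _ x z t).mp hz with rfl | hz
      · omega
      · exact hy z hz
-- insertBy puts x in front when it precedes every element
theorem pv_ins_front (x : List Int) (zs : List (List Int))
    (h : ∀ z ∈ zs, x.headI < (z : List Int).headI) :
    PySem.List.insertBy (fun a b => decide ((a : List Int).headI < b.headI)) x zs = x :: zs := by
  cases zs with
  | nil => rfl
  | cons z t =>
    have := h z (by simp)
    simp [PySem.List.insertBy, this]

-- filter commutes with a stable insertion (sorted target)
theorem pv_filter_ins (p : List Int → Bool) (x : List Int) : ∀ (ys : List (List Int)),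
    ys.Pairwise (fun a b => (a : List Int).headI ≤ b.headI) →
    (PySem.List.insertBy (fun a b => decide ((a : List Int).headI < b.headI)) x ys).filter p
    = if p x then PySem.List.insertBy (fun a b => decide ((a : List Int).headI < b.headI)) x (ys.filter p)
      else ys.filter p := by
  intro ys
  induction ys with
  | nil => intro _; by_cases hp : p x <;> simp [PySem.List.insertBy, hp]
  | cons y t ih =>
    intro h
    rcases List.pairwise_cons.mp h with ⟨hy, ht⟩
    simp only [PySem.List.insertBy]
    by_cases hc : x.headI < y.headI
    · simp only [hc, decide_true, if_true]
      have hfront : PySem.List.insertBy (fun a b => decide ((a : List Int).headI < b.headI)) x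
          ((y :: t).filter p) = x :: (y :: t).filter p := by
        refine pv_ins_front x _ ?_
        intro z hz
        have hz' : z ∈ y :: t := List.mem_of_mem_filter hz
        rcases List.mem_cons.mp hz' with rfl | hz'
        · omega
        · have := hy z hz'; omega
      by_cases hp : p x
      · simp [hp, hfront]
      · simp [hp]
    · simp only [hc, decide_false, Bool.false_eq_true, if_false]
      by_cases hpy : p y
      · simp only [List.filter_cons, hpy, if_true]
        rw [ih ht]
        by_cases hp : p x
        · simp only [hp, if_true]
          simp [PySem.List.insertBy, hc]
        · simp [hp]
      · simp only [List.filter_cons, hpy, Bool.false_eq_true, if_false]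
        rw [ih ht]
-- filter commutes with the whole insertion-sort fold
theorem pv_filter_fold (p : List Int → Bool) (l : List (List Int)) : ∀ (acc : List (List Int)),
    acc.Pairwise (fun a b => (a : List Int).headI ≤ b.headI) →
    (l.foldl (fun a x => PySem.List.insertBy (fun a b => decide ((a : List Int).headI < b.headI)) x a) acc).filter p
    = (l.filter p).foldl (fun a x => PySem.List.insertBy (fun a b => decide ((a : List Int).headI < b.headI)) x a) (acc.filter p) := by
  induction l with
  | nil => intro acc _; rfl
  | cons x t ih =>
    intro acc hacc
    simp only [List.foldl_cons, List.filter_cons]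
    rw [ih _ (pv_ins_pairwise x acc hacc), pv_filter_ins p x acc hacc]
    by_cases hp : p x
    · simp [hp]
    · simp [hp]

-- B's insertion sort of a filtered list = filtering Python's stable sort
theorem pv_isort_filter (p : List Int → Bool) (d : List (List Int)) :
    (d.filter p).foldl (fun a x => pvInsB x a) []
    = (PySem.List.sorted d (fun x => (x : List Int).headI) false).filter p := by
  have hins : ∀ (l acc : List (List Int)), l.foldl (fun a x => pvInsB x a) acc
      = l.foldl (fun a x => PySem.List.insertBy (fun a b => decide ((a : List Int).headI < b.headI)) x a) acc := by
    intro l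
    induction l with
    | nil => intro acc; rfl
    | cons x t ih => intro acc; simp only [List.foldl_cons, pv_insB_eq]
  rw [hins, PySem.List.sorted_eq_foldl_insertBy, pv_filter_fold p d [] (by simp)]
  simp

-- ===== VERDICT (by name: the statement is the Claim_ definition above) =====
theorem cooks_update_spec : Claim_equal_cooks_update := by
  intro cooks _ hpre
  unfold Spec_cooks_update cooks_update cooks_update_alt
  simp only []
  -- rewrite B's raw fold as a fold over the decremented list
  have hB : cooks.foldl (fun (st : List (List Int) × List (List Int)) c =>
        let c' := pvDec c
        if c'.headI < 1 then (st.1, pvInsB c' st.2) else (pvInsB c' st.1, st.2)) ([], [])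
      = (cooks.map pvDec).foldl (fun (st : List (List Int) × List (List Int)) c' =>
        if c'.headI < 1 then (st.1, pvInsB c' st.2) else (pvInsB c' st.1, st.2)) ([], []) := by
    rw [List.foldl_map]
  rw [hB, pv_fold_part, pv_isort_filter, pv_isort_filter, pv_sorted_map cooks hpre]
  set m := (PySem.List.sorted cooks (fun x => x.headI) false).map pvDec with hm
  rw [pv_foldl_eq _ [] 0]
  simp only [List.nil_append, zero_add]
  set n := m.countP (fun c => decide (c.headI < 1)) with hn
  have hpair : m.Pairwise (fun a b => (a : List Int).headI ≤ b.headI) := by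
    rw [hm, ← pv_sorted_map cooks hpre]
    exact PySem.List.sorted_pairwise _ _
  rcases pv_split m hpair with ⟨h1, h2⟩
  rw [PySem.List.slice_from_natCast, PySem.List.slice_to_natCast, h1, h2]
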